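-- pv_equiv track=rewrite | github.com/aisaev-68/Python-Basic | Module16/07_roller_skates/main.py | people_size
-- ===== SOURCE A (Python) =====
-- def people_size(f_lst, s_lst):
--     n_count = 0
--     p_count = 0
--     for item in s_lst:
--         for elem in f_lst:
--             if int(elem) - int(item) >= 0:
--                 f_lst.remove(elem)
--                 n_count += 1
--                 break
--         if n_count == 1:
--             p_count += 1
--             n_count = 0
--     return p_count
-- ===== SOURCE B (Python) =====
-- def people_size(f_lst, s_lst):
--     # Segment tree over f_lst positions (max of remaining values per node);
--     # each query takes the leftmost remaining value >= item and deletes it.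
--     # Does not mutate f_lst (A empties matched entries from it in place).
--     def omax(a, b):
--         if a is None:
--             return b
--         if b is None:
--             return a
--         return a if a >= b else b
--
--     def oge(o, item):
--         return o is not None and o >= item
--
--     def build(a):
--         if not a:
--             return [None]
--         if len(a) == 1:
--             return [a[0]]
--         k = len(a) // 2
--         l = build(a[:k])
--         r = build(a[k:])
--         return [omax(l[0], r[0]), l, r]
--
--     def extract(t, item):
--         if len(t) == 1:
--             return [None] if oge(t[0], item) else None
--         m, l, r = t
--         if not oge(m, item):
--             return None
--         if oge(l[0], item):
--             l2 = extract(l, item)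
--             return [omax(l2[0], r[0]), l2, r]
--         r2 = extract(r, item)
--         return [omax(l[0], r2[0]), l, r2]
--
--     t = build(f_lst)
--     p_count = 0
--     for item in s_lst:
--         t2 = extract(t, item)
--         if t2 is not None:
--             t = t2
--             p_count += 1
--     return p_count
-- ===== Notes on version B (the rewrite author's own statement) =====
-- stated objective: faster
-- what changed: Replaces A's per-item linear scan of (and first-fit removal from) f_lst with a segment tree of maxima over f_lst positions: each query descends to the leftmost remaining value >= item and deletes it, so the inner scan disappears.
import Mathlib
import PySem

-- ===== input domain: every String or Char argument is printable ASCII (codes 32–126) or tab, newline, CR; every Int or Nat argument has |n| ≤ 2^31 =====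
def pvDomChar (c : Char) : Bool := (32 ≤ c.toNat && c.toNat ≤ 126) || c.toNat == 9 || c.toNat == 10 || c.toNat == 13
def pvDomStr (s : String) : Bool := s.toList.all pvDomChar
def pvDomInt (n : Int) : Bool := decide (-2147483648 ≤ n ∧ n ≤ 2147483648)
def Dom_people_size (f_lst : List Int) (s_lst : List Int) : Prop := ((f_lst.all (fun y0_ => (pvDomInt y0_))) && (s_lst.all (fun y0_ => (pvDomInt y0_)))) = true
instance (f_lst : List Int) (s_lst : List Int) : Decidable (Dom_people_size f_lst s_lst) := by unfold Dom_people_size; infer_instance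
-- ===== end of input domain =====

-- B replaces A's per-item linear scan (first-fit removal from f_lst) with a segment tree
-- of maxima over f_lst positions, extracting the leftmost remaining value >= item per query
-- (objective: faster, O(n + m log n) vs O(n*m)).  The equivalence is about the RETURN value
-- only: A removes matched elements from f_lst in place, B does not mutate its arguments.

-- ===== PORT A =====
-- inner `for elem in f_lst: if int(elem) - int(item) >= 0: ... break` — first hit, then removed
def pyFindFirst (f_lst : List Int) (item : Int) : Option Int :=
  match f_lst with
  | [] => none
  | elem :: rest => if elem - item ≥ 0 then some elem else pyFindFirst rest item

-- one outer-loop iteration of A, state = (f_lst, n_count, p_count)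
def stepA (st : List Int × Int × Int) (item : Int) : List Int × Int × Int :=
  let fn : List Int × Int :=
    match pyFindFirst st.1 item with
    | some elem => ((PySem.List.remove? st.1 elem).getD st.1, st.2.1 + 1)
    | none => (st.1, st.2.1)
  if fn.2 = 1 then (fn.1, 0, st.2.2 + 1) else (fn.1, fn.2, st.2.2)

def people_size (f_lst : List Int) (s_lst : List Int) : Int :=
  (s_lst.foldl stepA (f_lst, 0, 0)).2.2

-- ===== PORT B =====
-- segment tree node: cached max of remaining values (none = empty); python [o] / [m,l,r]
inductive STree where
  | leaf : Option Int → STree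
  | node : Option Int → STree → STree → STree
deriving DecidableEq, Repr

def STree.top : STree → Option Int
  | .leaf o => o
  | .node m _ _ => m

-- python omax(a, b)
def omax (a b : Option Int) : Option Int :=
  match a with
  | none => b
  | some x => match b with
    | none => some x
    | some y => if x ≥ y then some x else some y

-- python oge(o, item)
def oge (o : Option Int) (item : Int) : Bool :=
  match o with
  | none => false
  | some v => v ≥ item

-- python build(a)
def buildT : List Int → STree
  | [] => .leaf none
  | [x] => .leaf (some x)
  | x :: y :: rest =>
    let a := x :: y :: rest
    let k := a.length / 2
    let l := buildT (a.take k)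
    let r := buildT (a.drop k)
    .node (omax l.top r.top) l r
termination_by a => a.length
decreasing_by
  · simp [List.length_take]; omega
  · simp; omega

-- python extract(t, item)
def extractT : STree → Int → Option STree
  | .leaf o, item => if oge o item then some (.leaf none) else none
  | .node m l r, item =>
    if oge m item then
      if oge l.top item then
        match extractT l item with
        | some l2 => some (.node (omax l2.top r.top) l2 r)
        | none => none
      else
        match extractT r item with
        | some r2 => some (.node (omax l.top r2.top) l r2)
        | none => none
    else none

-- one loop iteration of B, state = (tree, p_count)
def stepB (st : STree × Int) (item : Int) : STree × Int :=
  match extractT st.1 item with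
  | some t2 => (t2, st.2 + 1)
  | none => st

def people_size_alt (f_lst : List Int) (s_lst : List Int) : Int :=
  (s_lst.foldl stepB (buildT f_lst, 0)).2

-- ===== PRECONDITION & SPEC =====
def Spec_people_size (f_lst : List Int) (s_lst : List Int) (out : Int) : Prop := out = people_size_alt f_lst s_lst
instance (f_lst : List Int) (s_lst : List Int) (out : Int) : Decidable (Spec_people_size f_lst s_lst out) := by unfold Spec_people_size; infer_instance

-- ===== CLAIM (what is proved, stated in full; the proofs are below) =====
def Claim_equal_people_size : Prop := ∀ (f_lst : List Int) (s_lst : List Int), Dom_people_size f_lst s_lst → Spec_people_size f_lst s_lst (people_size f_lst s_lst)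

-- ===== LEMMAS AND PROOFS =====

-- the leaves of a tree, left to right (none = deleted slot)
def toOpts : STree → List (Option Int)
  | .leaf o => [o]
  | .node _ l r => toOpts l ++ toOpts r

-- the max caches are correct
def WF : STree → Prop
  | .leaf _ => True
  | .node m l r => WF l ∧ WF r ∧ m = omax l.top r.top

def lmax (os : List (Option Int)) : Option Int := os.foldr omax none

-- model of one B extraction on the leaf list: blank the first live value ≥ item
def emod : List (Option Int) → Int → Option (List (Option Int))
  | [], _ => none
  | o :: os, item => if oge o item then some (none :: os) else (emod os item).map (o :: ·)

-- model of one A iteration: remove the first element ≥ item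
def ffRemove : List Int → Int → Option (List Int)
  | [], _ => none
  | x :: xs, item => if x - item ≥ 0 then some xs else (ffRemove xs item).map (x :: ·)

theorem omax_none_right (a : Option Int) : omax a none = a := by
  cases a <;> rfl

theorem omax_some_some (x y : Int) : omax (some x) (some y) = some (max x y) := by
  show (if x ≥ y then some x else some y) = some (max x y)
  split_ifs <;> (congr 1; omega)

theorem omax_assoc (a b c : Option Int) : omax (omax a b) c = omax a (omax b c) := by
  cases a with
  | none => rfl
  | some x => cases b with
    | none => rfl
    | some y => cases c with
      | none => simp [omax_none_right]
      | some z => simp only [omax_some_some, max_assoc]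

theorem lmax_append (a b : List (Option Int)) : lmax (a ++ b) = omax (lmax a) (lmax b) := by
  induction a with
  | nil => simp [lmax, omax]
  | cons o a ih => simp [lmax, List.foldr] at ih ⊢; rw [ih, omax_assoc]

theorem top_eq (t : STree) (h : WF t) : t.top = lmax (toOpts t) := by
  induction t with
  | leaf o => simp [STree.top, toOpts, lmax, omax_none_right]
  | node m l r ihl ihr =>
    obtain ⟨wl, wr, hm⟩ := h
    show m = lmax (toOpts (.node m l r))
    rw [toOpts, lmax_append, hm, ihl wl, ihr wr]

theorem oge_omax (a b : Option Int) (item : Int) :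
    oge (omax a b) item = (oge a item || oge b item) := by
  cases a <;> cases b <;> simp [oge, omax] <;> split_ifs <;> simp_all <;> omega

theorem lmax_oge (os : List (Option Int)) (item : Int) :
    oge (lmax os) item = os.any (fun o => oge o item) := by
  induction os with
  | nil => rfl
  | cons o os ih => simp [lmax, List.foldr] at ih ⊢; rw [oge_omax, ih]

theorem emod_eq_none_iff (os : List (Option Int)) (item : Int) :
    emod os item = none ↔ os.any (fun o => oge o item) = false := by
  induction os with
  | nil => simp [emod]
  | cons o os ih =>
    by_cases h : oge o item = true <;> simp [emod, h, ih]

theorem emod_append (a b : List (Option Int)) (item : Int) :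
    emod (a ++ b) item =
      match emod a item with
      | some a' => some (a' ++ b)
      | none => (emod b item).map (a ++ ·) := by
  induction a with
  | nil => cases hb : emod b item <;> simp [emod, hb]
  | cons o a ih =>
    by_cases h : oge o item = true
    · simp [emod, h]
    · simp only [List.cons_append, emod, h, if_neg, Bool.not_eq_true] at *
      rw [ih]
      cases ha : emod a item <;> cases hb : emod b item <;> simp

theorem extract_sim (t : STree) (item : Int) (h : WF t) :
    (match emod (toOpts t) item with
     | none => extractT t item = none
     | some os' => ∃ t', extractT t item = some t' ∧ WF t' ∧ toOpts t' = os') := by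
  induction t with
  | leaf o =>
    by_cases ho : oge o item = true
    · simp only [toOpts, emod, ho, if_true, extractT]
      exact ⟨.leaf none, rfl, trivial, rfl⟩
    · simp at ho; simp [toOpts, emod, ho, extractT]
  | node m l r ihl ihr =>
    obtain ⟨wl, wr, hm⟩ := h
    have htl : oge l.top item = (toOpts l).any (fun o => oge o item) := by
      rw [top_eq l wl, lmax_oge]
    have htr : oge r.top item = (toOpts r).any (fun o => oge o item) := by
      rw [top_eq r wr, lmax_oge]
    have hmm : oge m item = (oge l.top item || oge r.top item) := by
      rw [hm, oge_omax]
    by_cases hML : oge l.top item = true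
    · -- hit in the left subtree
      have hl := ihl wl
      have hany : (toOpts l).any (fun o => oge o item) = true := by rw [← htl]; exact hML
      have : emod (toOpts l) item ≠ none := by
        intro hn; rw [emod_eq_none_iff] at hn; simp [hn] at hany
      obtain ⟨tl', hemod⟩ := Option.ne_none_iff_exists'.mp this
      rw [hemod] at hl
      obtain ⟨l2, hx, wl2, hto⟩ := hl
      simp only [toOpts, emod_append, hemod, extractT, hmm, hML, Bool.true_or, if_true, hx]
      exact ⟨_, rfl, ⟨wl2, wr, rfl⟩, by rw [toOpts, hto]⟩
    · simp at hML
      have hln : emod (toOpts l) item = none := by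
        rw [emod_eq_none_iff]; rw [htl] at hML; exact hML
      by_cases hMR : oge r.top item = true
      · -- hit in the right subtree only
        have hr := ihr wr
        have hany : (toOpts r).any (fun o => oge o item) = true := by rw [← htr]; exact hMR
        have : emod (toOpts r) item ≠ none := by
          intro hn; rw [emod_eq_none_iff] at hn; simp [hn] at hany
        obtain ⟨tr', hemod⟩ := Option.ne_none_iff_exists'.mp this
        rw [hemod] at hr
        obtain ⟨r2, hx, wr2, hto⟩ := hr
        simp only [toOpts, emod_append, hln, hemod, extractT, hmm, hML, hMR,
          Bool.false_or, if_true, hx, Option.map_some]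
        exact ⟨_, rfl, ⟨wl, wr2, rfl⟩, by rw [toOpts, hto]⟩
      · -- no hit at all
        simp at hMR
        have hrn : emod (toOpts r) item = none := by
          rw [emod_eq_none_iff]; rw [htr] at hMR; exact hMR
        simp [toOpts, emod_append, hln, hrn, extractT, hmm, hML, hMR]

theorem build_sim (xs : List Int) :
    WF (buildT xs) ∧ (toOpts (buildT xs)).reduceOption = xs := by
  induction xs using buildT.induct with
  | case1 => simp [buildT, toOpts, WF, List.reduceOption]
  | case2 x => simp [buildT, toOpts, WF, List.reduceOption]
  | case3 x y rest a k ih1 ih2 =>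
    rw [buildT]
    refine ⟨⟨ih1.1, ih2.1, rfl⟩, ?_⟩
    simp only [toOpts, List.reduceOption_append]
    rw [ih1.2, ih2.2, List.take_append_drop]

theorem pyFindFirst_ge (f : List Int) (item e : Int) (h : pyFindFirst f item = some e) :
    item ≤ e := by
  induction f with
  | nil => simp [pyFindFirst] at h
  | cons x xs ih =>
    by_cases hx : item ≤ x
    · simp [pyFindFirst, hx] at h; omega
    · simp [pyFindFirst, hx] at h; exact ih h

theorem pyFindFirst_mem (f : List Int) (item e : Int) (h : pyFindFirst f item = some e) :
    e ∈ f := by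
  induction f with
  | nil => simp [pyFindFirst] at h
  | cons x xs ih =>
    by_cases hx : item ≤ x
    · simp [pyFindFirst, hx] at h; simp [h]
    · simp [pyFindFirst, hx] at h; simp [ih h]

theorem stepA_eq (f : List Int) (item : Int) :
    (match pyFindFirst f item with
     | some e => some ((PySem.List.remove? f e).getD f)
     | none => none) = ffRemove f item := by
  induction f with
  | nil => rfl
  | cons x xs ih =>
    simp only [pyFindFirst, ffRemove]
    by_cases hx : x - item ≥ 0
    · rw [if_pos hx, if_pos hx]
      show some ((PySem.List.remove? (x :: xs) x).getD (x :: xs)) = some xs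
      rw [PySem.List.remove?_cons_self]
      rfl
    · rw [if_neg hx, if_neg hx]
      cases hf : pyFindFirst xs item with
      | none =>
        rw [hf] at ih
        have ih' : (none : Option (List Int)) = ffRemove xs item := ih
        rw [← ih']
        rfl
      | some e =>
        rw [hf] at ih
        have ih' : some ((PySem.List.remove? xs e).getD xs) = ffRemove xs item := ih
        have he : item ≤ e := pyFindFirst_ge xs item e hf
        have hmem : e ∈ xs := pyFindFirst_mem xs item e hf
        have hne : x ≠ e := by omega
        have hrm : PySem.List.remove? xs e = some (xs.erase e) :=
          PySem.List.remove?_eq_some_erase xs e hmem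
        show some ((PySem.List.remove? (x :: xs) e).getD (x :: xs)) =
          (ffRemove xs item).map (fun a => x :: a)
        rw [← ih', PySem.List.remove?_cons_of_ne xs hne, hrm]
        rfl

theorem reduce_sim (os : List (Option Int)) (item : Int) :
    ffRemove os.reduceOption item = (emod os item).map (·.reduceOption) := by
  induction os with
  | nil => rfl
  | cons o os ih =>
    cases o with
    | none =>
      simp only [List.reduceOption_cons_of_none, emod, oge, Bool.false_eq_true, if_neg,
        not_false_iff, ih, Option.map_map]
      cases emod os item <;> simp [List.reduceOption_cons_of_none]
    | some x =>
      rw [List.reduceOption_cons_of_some]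
      simp only [ffRemove, emod]
      by_cases hx : x - item ≥ 0
      · have hb : oge (some x) item = true := by simp [oge]; omega
        rw [if_pos hx, hb, if_pos rfl]
        rw [Option.map_some, List.reduceOption_cons_of_none]
      · have hb : oge (some x) item = false := by simp [oge]; omega
        rw [if_neg hx, hb]
        simp only [Bool.false_eq_true, if_false, ih, Option.map_map]
        cases emod os item <;> simp [List.reduceOption_cons_of_some]

theorem fold_sim (s : List Int) : ∀ (f : List Int) (t : STree) (p : Int),
    WF t → (toOpts t).reduceOption = f →
    (s.foldl stepA (f, 0, p)).2.2 = (s.foldl stepB (t, p)).2 := by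
  induction s with
  | nil => intro f t p _ _; rfl
  | cons item s ih =>
    intro f t p wt hft
    have hsim := extract_sim t item wt
    have hred := reduce_sim (toOpts t) item
    rw [hft] at hred
    cases hemod : emod (toOpts t) item with
    | none =>
      rw [hemod] at hsim hred
      have hff : ffRemove f item = none := by simpa using hred
      have hpf : pyFindFirst f item = none := by
        have := stepA_eq f item
        rw [hff] at this
        cases hq : pyFindFirst f item with
        | none => rfl
        | some e => rw [hq] at this; simp at this
      simp only [List.foldl_cons, stepA, stepB, hpf, hsim]
      norm_num
      exact ih f t p wt hft
    | some os' =>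
      rw [hemod] at hsim hred
      obtain ⟨t', hx, wt', hto⟩ := hsim
      have hff : ffRemove f item = some os'.reduceOption := by simpa using hred
      obtain ⟨e, hpf⟩ : ∃ e, pyFindFirst f item = some e := by
        have := stepA_eq f item
        rw [hff] at this
        cases hq : pyFindFirst f item with
        | none => rw [hq] at this; simp at this
        | some e => exact ⟨e, rfl⟩
      have hrm : (PySem.List.remove? f e).getD f = os'.reduceOption := by
        have := stepA_eq f item
        rw [hpf, hff] at this
        simpa using this
      simp only [List.foldl_cons, stepA, stepB, hpf, hx, hrm]
      norm_num
      exact ih os'.reduceOption t' (p + 1) wt' (by rw [hto])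

-- ===== VERDICT (by name: the statement is the Claim_ definition above) =====
theorem people_size_spec : Claim_equal_people_size := by
  intro f_lst s_lst _
  unfold Spec_people_size people_size people_size_alt
  obtain ⟨hw, hr⟩ := build_sim f_lst
  exact fold_sim s_lst f_lst (buildT f_lst) 0 hw hr
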